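-- pv_equiv track=rewrite | github.com/Hyun010/algorithm | 프로그래머스/2/60058. 괄호 변환/괄호 변환.py | split_uv
-- ===== SOURCE A (Python) =====
-- def split_uv(p): #균형잡힌 괄호 문자열 u,v 나누기
--     balance = 0
--     for i in range(len(p)):
--         if p[i] == '(':
--             balance += 1
--         else:
--             balance -= 1
--         if balance == 0: #균형->u,v 리턴
--             return p[:i + 1], p[i + 1:]
-- ===== SOURCE B (Python) =====
-- def split_uv(p):
--     # B: consume characters from an explicit stack and BUILD u by accumulating
--     # them; v is whatever remains on the stack when the depth first hits 0.
--     # No index arithmetic, no slicing of p.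
--     stack = list(reversed(p))
--     u = []
--     depth = 0
--     while stack:
--         c = stack.pop()
--         u.append(c)
--         depth += 1 if c == '(' else -1
--         if depth == 0:
--             return ''.join(u), ''.join(reversed(stack))
--     return None
-- ===== Notes on version B (the rewrite author's own statement) =====
-- stated objective: alternative
-- what changed: B consumes the input from an explicit character stack and builds u by accumulating popped characters, returning (accumulated u, remaining stack) when the depth first hits 0, instead of A's index loop that finds a split position and slices p there.
-- outside the precondition, e.g. on split_uv('((('): A returns None, B returns None; on split_uv(''): A returns None, B returns None
import Mathlib
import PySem

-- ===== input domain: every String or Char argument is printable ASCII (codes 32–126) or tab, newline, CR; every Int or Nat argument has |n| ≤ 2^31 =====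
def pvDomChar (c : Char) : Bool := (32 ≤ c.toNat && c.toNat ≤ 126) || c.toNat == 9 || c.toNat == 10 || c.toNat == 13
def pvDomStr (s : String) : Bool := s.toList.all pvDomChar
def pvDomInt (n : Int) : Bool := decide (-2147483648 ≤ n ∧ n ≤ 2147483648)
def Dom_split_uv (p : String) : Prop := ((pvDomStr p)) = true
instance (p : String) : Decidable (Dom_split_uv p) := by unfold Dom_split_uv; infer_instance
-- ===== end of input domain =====

-- B recursively consumes the string and builds u by prepending characters,
-- returning (u, v) from the recursion instead of A's index loop + slicing
-- (objective: alternative).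


-- ===== PORT A =====
-- A's loop: walk the characters (index i), update balance, return at the first
-- index where the balance is 0. Returns the split index.
def aLoop : List Char → Int → Nat → Option Nat
  | [], _, _ => none
  | c :: rest, balance, i =>
    let balance' := if c = '(' then balance + 1 else balance - 1
    if balance' = 0 then some i else aLoop rest balance' (i + 1)

-- p[:i+1], p[i+1:] with 0 ≤ i+1 ≤ len p: Python's slice is exactly take/drop here.
def split_uv (p : String) : String × String :=
  match aLoop p.toList 0 0 with
  | some i => (String.ofList (p.toList.take (i + 1)), String.ofList (p.toList.drop (i + 1)))
  | none => ("", "")   -- Python A falls through and returns None here; excluded by Pre_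

-- ===== PORT B =====
-- B's loop: the Python stack is list(reversed(p)) popped from the end, i.e. the
-- remaining characters of p consumed front-first; we model it as that list.
-- u accumulates popped characters; at depth 0 return (u, remaining stack).
def bLoop : List Char → List Char → Int → Option (List Char × List Char)
  | [], _, _ => none
  | c :: stack, u, depth =>
    let d := depth + (if c = '(' then 1 else -1)
    -- ''.join(u ++ [c]) and ''.join(reversed(stack)) are these very lists
    if d = 0 then some (u ++ [c], stack) else bLoop stack (u ++ [c]) d

def split_uv_alt (p : String) : String × String :=
  match bLoop p.toList [] 0 with
  | some (u, rest) => (String.ofList u, String.ofList rest)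
  | none => ("", "")   -- Python B returns None here; excluded by Pre_

-- ===== PRECONDITION & SPEC =====
-- Pre_ excludes inputs where the running balance never reaches 0 (e.g. "", "(((")):
-- there Python A falls off the loop and returns None, which is not a String × String.
def Pre_split_uv (p : String) : Prop :=
  ∃ k < p.toList.length,
    (((p.toList.take (k + 1)).map (fun c => if c = '(' then (1 : Int) else -1)).sum = 0)
instance (p : String) : Decidable (Pre_split_uv p) := by unfold Pre_split_uv; infer_instance

def pvWitness_split_uv : String := "()"

def Spec_split_uv (p : String) (out : String × String) : Prop := out = split_uv_alt p
instance (p : String) (out : String × String) : Decidable (Spec_split_uv p out) := by unfold Spec_split_uv; infer_instance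

-- ===== CLAIM (what is proved, stated in full; the proofs are below) =====
def Claim_equal_split_uv : Prop := ∀ (p : String), Dom_split_uv p → Pre_split_uv p → Spec_split_uv p (split_uv p)

-- ===== LEMMAS AND PROOFS =====

-- A's starting index only shifts the returned index.
theorem aLoop_shift (l : List Char) (bal : Int) (i : Nat) :
    aLoop l bal i = (aLoop l bal 0).map (· + i) := by
  induction l generalizing bal i with
  | nil => simp [aLoop]
  | cons c rest ih =>
    simp only [aLoop]
    set b' := (if c = '(' then bal + 1 else bal - 1) with hb'
    by_cases h : b' = 0
    · simp [h]
    · rw [if_neg h, if_neg h, ih b' (i + 1), ih b' 1]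
      cases aLoop rest b' 0 with
      | none => simp
      | some k => simp [Option.map]; omega

-- B's stack loop returns exactly (u ++ take/drop split) at A's index.
theorem bLoop_eq_aLoop (l : List Char) (u : List Char) (bal : Int) :
    bLoop l u bal
      = (aLoop l bal 0).map (fun j => (u ++ l.take (j + 1), l.drop (j + 1))) := by
  induction l generalizing u bal with
  | nil => simp [aLoop, bLoop]
  | cons c rest ih =>
    have hb : bal + (if c = '(' then (1 : Int) else -1)
        = (if c = '(' then bal + 1 else bal - 1) := by split_ifs <;> ring
    simp only [bLoop, aLoop, hb]
    set b' := (if c = '(' then bal + 1 else bal - 1) with hb'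
    by_cases h : b' = 0
    · simp [h]
    · rw [if_neg h, if_neg h, ih, aLoop_shift rest b' 1]
      cases aLoop rest b' 0 with
      | none => simp
      | some j => simp [Option.map, List.take_succ_cons, List.drop_succ_cons]

-- ===== VERDICT (by name: the statement is the Claim_ definition above) =====
theorem split_uv_spec : Claim_equal_split_uv := by
  intro p _ _
  unfold Spec_split_uv split_uv split_uv_alt
  rw [bLoop_eq_aLoop]
  cases h : aLoop p.toList 0 0 <;> simp [h]
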